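-- pv_equiv track=rewrite | github.com/sonambharti/Python | Basic Algorithms/countSplitWays.py | count_ways_to_split
-- ===== SOURCE A (Python) =====
-- def count_ways_to_split(s):
--     n = len(s)
--     unique_chars = set()
--     count = 0
--
--     for i in range(1, n):
--         unique_chars.add(s[i - 1])
--
--         if len(unique_chars) == len(set(s[i:])):
--             count += 1
--
--     return count
-- ===== SOURCE B (Python) =====
-- def count_ways_to_split(s):
--     # one backward pass precomputes suffix distinct counts, one forward pass
--     # tracks prefix distinct counts; compare them pairwise (O(n) total)
--     seen = set()
--     suf = []
--     for ch in reversed(s):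
--         seen.add(ch)
--         suf.append(len(seen))
--     suf.reverse()
--     seen = set()
--     pre = []
--     for ch in s:
--         seen.add(ch)
--         pre.append(len(seen))
--     return sum(1 for p, q in zip(pre, suf[1:]) if p == q)
-- ===== Notes on version B (the rewrite author's own statement) =====
-- stated objective: faster
-- what changed: Replaces A's per-split recomputation of set(s[i:]) by a single backward pass precomputing suffix distinct counts plus a single forward pass of prefix distinct counts, comparing them pairwise.
import Mathlib
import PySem

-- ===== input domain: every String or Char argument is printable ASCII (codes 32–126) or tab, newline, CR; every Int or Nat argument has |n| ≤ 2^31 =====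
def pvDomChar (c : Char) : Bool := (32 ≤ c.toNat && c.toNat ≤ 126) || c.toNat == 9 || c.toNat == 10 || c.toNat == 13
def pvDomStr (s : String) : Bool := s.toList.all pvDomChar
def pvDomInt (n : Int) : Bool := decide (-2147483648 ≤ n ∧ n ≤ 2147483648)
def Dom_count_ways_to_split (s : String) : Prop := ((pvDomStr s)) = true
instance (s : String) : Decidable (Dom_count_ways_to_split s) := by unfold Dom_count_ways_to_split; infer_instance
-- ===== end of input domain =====

-- B replaces A's O(n^2) per-split recomputation of set(s[i:]) by precomputed suffix
-- distinct counts (one backward pass) compared against a running prefix count: O(n).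


-- ===== PORT A =====
def count_ways_to_split (s : String) : Int :=
  let l := s.toList
  let n := PySem.Str.len s
  ((PySem.List.pyRange 1 n 1).foldl
    (fun (st : PySem.Set Char × Int) i =>
      let u := PySem.Set.add st.1 (PySem.List.pyGetD l (i - 1) ' ')
      (u, if PySem.Set.len u = PySem.Set.len (PySem.Set.ofList (PySem.List.slice l (some i) none))
          then st.2 + 1 else st.2))
    (PySem.Set.empty, 0)).2

-- ===== PORT B =====
-- the 'seen.add(ch); out.append(len(seen))' loop body, shared by B's two passes
def pvLenStep (st : PySem.Set Char × List Int) (ch : Char) : PySem.Set Char × List Int :=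
  let se := PySem.Set.add st.1 ch
  (se, st.2 ++ [PySem.Set.len se])

def count_ways_to_split_alt (s : String) : Int :=
  let l := s.toList
  let suf := (l.reverse.foldl pvLenStep (PySem.Set.empty, [])).2.reverse
  let pre := (l.foldl pvLenStep (PySem.Set.empty, [])).2
  (((pre.zip (suf.drop 1)).countP (fun pq => pq.1 == pq.2) : Int))

-- ===== PRECONDITION & SPEC =====
def Spec_count_ways_to_split (s : String) (out : Int) : Prop := out = count_ways_to_split_alt s
instance (s : String) (out : Int) : Decidable (Spec_count_ways_to_split s out) := by unfold Spec_count_ways_to_split; infer_instance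

-- ===== CLAIM (what is proved, stated in full; the proofs are below) =====
def Claim_equal_count_ways_to_split : Prop := ∀ (s : String), Dom_count_ways_to_split s → Spec_count_ways_to_split s (count_ways_to_split s)

-- ===== LEMMAS AND PROOFS =====

-- distinct-count of a list, as the ports compute it
def pvD (xs : List Char) : Int := PySem.Set.len (PySem.Set.ofList xs)

lemma pvD_card (xs : List Char) : pvD xs = (xs.toFinset.card : Int) := by
  unfold pvD PySem.Set.len
  congr 1
  rw [← List.toFinset_card_of_nodup (PySem.Set.nodup_ofList xs)]
  congr 1
  ext c
  simp [PySem.Set.mem_ofList]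

lemma pvD_mem_congr (xs ys : List Char) (h : ∀ c, c ∈ xs ↔ c ∈ ys) : pvD xs = pvD ys := by
  rw [pvD_card, pvD_card]
  congr 2
  ext c
  simp [h c]

lemma pvLenStep_foldl (l p : List Char) (acc : List Int) :
    l.foldl pvLenStep (PySem.Set.ofList p, acc)
      = (PySem.Set.ofList (p ++ l),
         acc ++ (List.range l.length).map (fun j => pvD (p ++ l.take (j + 1)))) := by
  induction l generalizing p acc with
  | nil => simp
  | cons ch t ih =>
    have h1 : PySem.Set.add (PySem.Set.ofList p) ch = PySem.Set.ofList (p ++ [ch]) :=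
      (PySem.Set.ofList_append_singleton p ch).symm
    simp only [List.foldl_cons, pvLenStep, h1]
    rw [ih (p ++ [ch])]
    refine Prod.ext ?_ ?_
    · simp
    · simp only [List.length_cons, List.range_succ_eq_map, List.map_cons, List.map_map]
      simp only [pvD, List.append_assoc]
      simp

lemma pvA_foldl (l : List Char) (t j : Nat) (ht : j + t ≤ l.length) (c : Int) :
    ((List.range t).map (fun k : Nat => ((j : Int) + 1) + (k : Int))).foldl
      (fun (st : PySem.Set Char × Int) i =>
        let u := PySem.Set.add st.1 (PySem.List.pyGetD l (i - 1) ' ')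
        (u, if PySem.Set.len u = PySem.Set.len (PySem.Set.ofList (PySem.List.slice l (some i) none))
            then st.2 + 1 else st.2))
      (PySem.Set.ofList (l.take j), c)
    = (PySem.Set.ofList (l.take (j + t)),
       c + ((List.range t).countP (fun k => pvD (l.take (j + k + 1)) == pvD (l.drop (j + k + 1))) : Int)) := by
  induction t generalizing j c with
  | zero => simp
  | succ t ih =>
    rw [List.range_succ_eq_map, List.map_cons, List.foldl_cons]
    have hj : j < l.length := by omega
    have hget : PySem.List.pyGetD l (((j : Int) + 1) + ((0:Nat) : Int) - 1) ' ' = l[j] := by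
      have hidx : ((j : Int) + 1) + ((0:Nat) : Int) - 1 = ((j : Nat) : Int) := by push_cast; ring
      rw [hidx, PySem.List.pyGetD_natCast]
      exact List.getD_eq_getElem l ' ' hj
    have htake : l.take j ++ [l[j]] = l.take (j + 1) := by
      rw [List.take_add_one, List.getElem?_eq_getElem hj]; rfl
    have hadd : PySem.Set.add (PySem.Set.ofList (l.take j)) l[j]
        = PySem.Set.ofList (l.take (j + 1)) := by
      rw [← htake]; exact (PySem.Set.ofList_append_singleton _ _).symm
    have hslice : PySem.List.slice l (some (((j : Int) + 1) + ((0:Nat) : Int))) none = l.drop (j+1) := by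
      have h2 : ((j : Int) + 1) + ((0:Nat) : Int) = ((j + 1 : Nat) : Int) := by push_cast; ring
      rw [h2, PySem.List.slice_from_natCast]
    simp only [hget, hadd, hslice]
    have hmapeq : (List.range t).map ((fun k : Nat => ((j : Int) + 1) + (k : Int)) ∘ Nat.succ)
        = (List.range t).map (fun k : Nat => (((j+1:Nat) : Int) + 1) + (k : Int)) := by
      apply List.map_congr_left; intro k _; simp [Function.comp]; ring
    rw [List.map_map, hmapeq, ih (j+1) (by omega)]
    refine Prod.ext ?_ ?_
    · simp only []; congr 2; omega
    · simp only []
      rw [List.countP_cons, List.countP_map]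
      have hq : (List.range t).countP (fun k => pvD (l.take (j + 1 + k + 1)) == pvD (l.drop (j + 1 + k + 1)))
          = (List.range t).countP ((fun k => pvD (l.take (j + k + 1)) == pvD (l.drop (j + k + 1))) ∘ Nat.succ) := by
        apply List.countP_congr; intro k _
        have h3 : j + 1 + k + 1 = j + Nat.succ k + 1 := by omega
        simp [Function.comp, h3]
      rw [hq]
      have hiff : (PySem.Set.len (PySem.Set.ofList (l.take (j+1)))
          = PySem.Set.len (PySem.Set.ofList (l.drop (j+1)))) ↔
          ((fun k => pvD (l.take (j + k + 1)) == pvD (l.drop (j + k + 1))) 0 = true) := by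
        simp [pvD]
      by_cases hp : ((fun k => pvD (l.take (j + k + 1)) == pvD (l.drop (j + k + 1))) 0 = true)
      · rw [if_pos (hiff.mpr hp), if_pos hp]; push_cast; omega
      · rw [if_neg (fun hb => hp (hiff.mp hb)), if_neg hp]; push_cast; omega

lemma suf_eq (l : List Char) :
    ((List.range l.length).map (fun j => pvD (l.reverse.take (j + 1)))).reverse
      = (List.range l.length).map (fun i => pvD (l.drop i)) := by
  apply List.ext_getElem
  · simp
  · intro i h1 h2
    simp only [List.getElem_reverse, List.length_map, List.length_range, List.getElem_map,
      List.getElem_range] at h1 h2 ⊢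
    rw [List.take_reverse]
    have hd : l.length - (l.length - 1 - i + 1) = i := by omega
    rw [hd]
    exact pvD_mem_congr _ _ (fun c => List.mem_reverse)

-- zip of two range-maps, with the second shifted by one
lemma pvZip_eq {α β : Type} (f : Nat → α) (g : Nat → β) (n : Nat) :
    ((List.range n).map f).zip (((List.range n).map g).drop 1)
      = (List.range (n - 1)).map (fun i => (f i, g (i + 1))) := by
  apply List.ext_getElem
  · simp
  · intro i h1 h2
    simp only [List.getElem_zip, List.getElem_drop, List.getElem_map, List.getElem_range,
      List.length_zip, List.length_map, List.length_range, List.length_drop] at h1 h2 ⊢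
    congr 2
    omega

-- ===== VERDICT (by name: the statement is the Claim_ definition above) =====
theorem count_ways_to_split_spec : Claim_equal_count_ways_to_split := by
  intro s _
  unfold Spec_count_ways_to_split count_ways_to_split count_ways_to_split_alt
  simp only []
  set l := s.toList with hl
  have hn : PySem.Str.len s = (l.length : Int) := rfl
  -- B side: both passes via the pass lemma, then normalise the suffix list
  have hinit : (PySem.Set.empty : PySem.Set Char) = PySem.Set.ofList [] := rfl
  rw [hinit, pvLenStep_foldl l.reverse [] [], pvLenStep_foldl l [] []]
  simp only [List.nil_append, List.length_reverse, List.nil_append]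
  rw [suf_eq l, pvZip_eq (fun j => pvD (l.take (j+1))) (fun i => pvD (l.drop i)) l.length,
    List.countP_map]
  -- A side
  have htoNat : ((l.length : Int) - 1).toNat = l.length - 1 := by omega
  rw [hn, PySem.List.pyRange_one, htoNat]
  have hm : (List.range (l.length - 1)).map (fun k : Nat => (1 : Int) + (k : Int))
      = (List.range (l.length - 1)).map (fun k : Nat => (((0:Nat) : Int) + 1) + (k : Int)) := by
    apply List.map_congr_left; intro k _; push_cast; ring
  rw [hm, show (PySem.Set.ofList [] : PySem.Set Char) = PySem.Set.ofList (l.take 0) from rfl,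
    pvA_foldl l (l.length - 1) 0 (by omega) 0]
  simp only [Nat.zero_add]
  have hcp : List.countP
        ((fun pq : Int × Int => pq.1 == pq.2) ∘ fun i => (pvD (l.take (i + 1)), pvD (l.drop (i + 1))))
        (List.range (l.length - 1))
      = List.countP (fun k => pvD (l.take (k + 1)) == pvD (l.drop (k + 1)))
        (List.range (l.length - 1)) := by
    apply List.countP_congr; intro k _; rfl
  rw [hcp]
  omega
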